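-- pv_equiv track=rewrite | github.com/duggalr2/linkedin_recommend | link_rec/link_new/edu_classification.py | searchBS
-- ===== SOURCE A (Python) =====
-- def searchBS(big_list):
--     start_index = 0
--     # end_index = len(big_list)
--     new_end_index = 1
--     new_big_list = [list(i) for i in big_list]
--
--     while start_index < new_end_index:
--
--         new_end_index = len(new_big_list)
--         duplicate = []
--
--         for index in range(start_index, new_end_index):
--             item = new_big_list[index]
--             if item[0] == new_big_list[start_index][0] and item[-1] != new_big_list[start_index][
--                 -1] and index != start_index:
--                 new_big_list[start_index].append(item[-1])
--                 duplicate.append(new_big_list[index])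
--
--         for item in duplicate:
--             i = new_big_list.index(item)
--             del new_big_list[i]
--
--         start_index += 1
--     return new_big_list
-- ===== SOURCE B (Python) =====
-- def searchBS(big_list):
--     # Single pass: groups kept in creation order; a dict maps first element ->
--     # indices of its open groups, so each item only cascades through same-key groups.
--     groups = []            # list of (contents, running_last)
--     index_by_key = {}      # first element -> list of indices into groups
--     for item in big_list:
--         k = item[0]
--         last = item[-1]
--         placed = False
--         for gi in index_by_key.get(k, []):
--             contents, glast = groups[gi]
--             if glast != last:
--                 contents.append(last)
--                 groups[gi] = (contents, last)
--                 placed = True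
--                 break
--         if not placed:
--             index_by_key.setdefault(k, []).append(len(groups))
--             groups.append((list(item), last))
--     return [contents for contents, _ in groups]
-- ===== Notes on version B (the rewrite author's own statement) =====
-- stated objective: faster
-- what changed: A repeatedly rescans the list from each group head, appending differing last values and deleting absorbed sublists via list.index; B makes one pass, keeping groups in creation order plus a dict from first element to the indices of its open groups, so each item only touches same-key groups and nothing is ever deleted or rescanned.
-- outside the precondition, e.g. on searchBS([[1, 2], [9, 9], [1, 2, 3]]): A returns [[9, 9], [1, 2, 3]], B returns [[1, 2, 3], [9, 9]]
import Mathlib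
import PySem

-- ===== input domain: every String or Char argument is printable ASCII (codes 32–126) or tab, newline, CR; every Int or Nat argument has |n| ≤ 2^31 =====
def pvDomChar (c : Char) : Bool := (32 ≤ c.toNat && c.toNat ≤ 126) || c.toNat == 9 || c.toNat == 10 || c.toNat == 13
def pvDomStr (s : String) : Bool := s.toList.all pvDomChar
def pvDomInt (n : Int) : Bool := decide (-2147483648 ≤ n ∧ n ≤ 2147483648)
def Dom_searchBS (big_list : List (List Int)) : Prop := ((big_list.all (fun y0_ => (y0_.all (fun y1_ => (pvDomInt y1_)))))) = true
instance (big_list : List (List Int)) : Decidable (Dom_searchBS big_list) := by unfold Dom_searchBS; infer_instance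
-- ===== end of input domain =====

-- B replaces A's repeated passes with list.index/del deletions by one pass over the input
-- keeping a dict from first element to its open groups (objective: faster).

-- shared accessors: Python item[0] and item[-1]; the .getD 0 default is reached only for an
-- empty sublist, where Python raises IndexError (excluded by Pre_searchBS)
def pyFirst (l : List Int) : Int := (PySem.List.pyGet? l 0).getD 0
def pyLast (l : List Int) : Int := (PySem.List.pyGet? l (-1)).getD 0

-- ===== PORT A =====
-- inner `for index in range(start_index, new_end_index)` as a counter loop (the indices are
-- nonnegative Python ints, modelled by Nat); state: the mutated list and `duplicate`
def aInner (s : Nat) (i : Nat) (ne : Nat) (L : List (List Int)) (dup : List (List Int)) :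
    List (List Int) × List (List Int) :=
  if _ : i < ne then
    let item := L.getD i []
    if pyFirst item = pyFirst (L.getD s []) ∧ pyLast item ≠ pyLast (L.getD s []) ∧ i ≠ s then
      aInner s (i+1) ne (L.set s (L.getD s [] ++ [pyLast item])) (dup ++ [item])
    else
      aInner s (i+1) ne L dup
  else (L, dup)
termination_by ne - i

-- `for item in duplicate: del new_big_list[new_big_list.index(item)]`
def aDelete (L : List (List Int)) (dup : List (List Int)) : List (List Int) :=
  dup.foldl (fun acc d =>
    match PySem.List.index? acc d with
    | some i => acc.eraseIdx i
    | none => acc) L   -- none = ValueError, unreachable: each collected duplicate is still present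

-- the while loop; fuel big_list.length + 2 strictly exceeds the number of iterations
-- (start_index grows by 1 each iteration and an iteration needs start_index < a past length)
def aLoop : Nat → List (List Int) → Nat → Nat → List (List Int)
  | 0, L, _, _ => L  -- unreachable with the fuel supplied
  | fuel+1, L, s, ne =>
    if s < ne then
      aLoop fuel (aDelete (aInner s s L.length L []).1 (aInner s s L.length L []).2) (s+1) L.length
    else L

def searchBS (big_list : List (List Int)) : List (List Int) :=
  aLoop (big_list.length + 2) (big_list.map (fun i => i)) 0 1

-- ===== PORT B =====
-- walk the per-key list of group indices; the first group whose running last differs absorbs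
def bPlace (ids : List Nat) (groups : List (List Int × Int)) (last : Int) :
    Option (List (List Int × Int)) :=
  match ids with
  | [] => none
  | gi :: rest =>
      let g := groups.getD gi ([], 0)
      if g.2 ≠ last then some (groups.set gi (g.1 ++ [last], last))
      else bPlace rest groups last

def bStep (st : List (List Int × Int) × PySem.Dict Int (List Nat)) (item : List Int) :
    List (List Int × Int) × PySem.Dict Int (List Nat) :=
  let k := pyFirst item
  let last := pyLast item
  match bPlace (st.2.getD k []) st.1 last with
  | some groups' => (groups', st.2)
  | none => (st.1 ++ [(item, last)], st.2.insert k ((st.2.getD k []) ++ [st.1.length]))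

def searchBS_alt (big_list : List (List Int)) : List (List Int) :=
  (big_list.foldl bStep (([] : List (List Int × Int)), (PySem.Dict.empty : PySem.Dict Int (List Nat)))).1.map Prod.fst

-- ===== PRECONDITION & SPEC =====
-- Pre_ excludes (i) lists containing an empty sublist, on which A raises IndexError, and
-- (ii) lists in which one sublist is a prefix of another (in particular equal sublists), on
-- which A's delete-by-value `del l[l.index(item)]` may hit a different, value-equal element
-- and accidentally permute the surviving entries — a corner no caller would specify.
def Pre_searchBS (big_list : List (List Int)) : Prop :=
  (∀ l ∈ big_list, l ≠ []) ∧
  List.Pairwise (fun a b => ¬ a <+: b ∧ ¬ b <+: a) big_list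
instance (big_list : List (List Int)) : Decidable (Pre_searchBS big_list) := by
  unfold Pre_searchBS; infer_instance

def pvWitness_searchBS : List (List Int) := [[1, 2], [1, 3], [2, 5], [3, 2, 4]]

def Spec_searchBS (big_list : List (List Int)) (out : List (List Int)) : Prop := out = searchBS_alt big_list
instance (big_list : List (List Int)) (out : List (List Int)) : Decidable (Spec_searchBS big_list out) := by unfold Spec_searchBS; infer_instance

-- ===== CLAIM (what is proved, stated in full; the proofs are below) =====
def Claim_equal_searchBS : Prop := ∀ (big_list : List (List Int)), Dom_searchBS big_list → Pre_searchBS big_list → Spec_searchBS big_list (searchBS big_list)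

-- ===== LEMMAS AND PROOFS =====

theorem pyLast_append (c : List Int) (v : Int) : pyLast (c ++ [v]) = v := by
  simp [pyLast, PySem.List.pyGet?_neg_one_append_singleton]

theorem pyFirst_append (c : List Int) (v : Int) (h : c ≠ []) :
    pyFirst (c ++ [v]) = pyFirst c := by
  cases c with
  | nil => exact absurd rfl h
  | cons a c' => simp [pyFirst, PySem.List.pyGet?_zero]

-- the functional core shared by the characterisations of both ports:
-- one group absorbing from a tail; returns (final group, absorbed items, kept items)
def absorbG : (List Int × Int) → List (List Int) → (List Int × Int) × List (List Int) × List (List Int)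
  | g, [] => (g, [], [])
  | g, x :: xs =>
    if pyFirst x = pyFirst g.1 ∧ pyLast x ≠ g.2 then
      ((absorbG (g.1 ++ [pyLast x], pyLast x) xs).1,
       x :: (absorbG (g.1 ++ [pyLast x], pyLast x) xs).2.1,
       (absorbG (g.1 ++ [pyLast x], pyLast x) xs).2.2)
    else
      ((absorbG g xs).1, (absorbG g xs).2.1, x :: (absorbG g xs).2.2)

theorem absorbG_rest_len (g : List Int × Int) (t : List (List Int)) :
    (absorbG g t).2.2.length ≤ t.length := by
  induction t generalizing g with
  | nil => simp [absorbG]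
  | cons x xs ih =>
    simp only [absorbG]
    split
    · exact Nat.le_succ_of_le (ih _)
    · simpa using Nat.succ_le_succ (ih _)

theorem absorbG_abs_sublist (g : List Int × Int) (t : List (List Int)) :
    (absorbG g t).2.1.Sublist t := by
  induction t generalizing g with
  | nil => simp [absorbG]
  | cons x xs ih =>
    simp only [absorbG]
    split
    · exact List.Sublist.cons₂ x (ih _)
    · exact List.Sublist.cons x (ih _)

theorem absorbG_head_extend (g : List Int × Int) (t : List (List Int)) :
    ∃ e, (absorbG g t).1.1 = g.1 ++ e := by
  induction t generalizing g with
  | nil => exact ⟨[], by simp [absorbG]⟩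
  | cons x xs ih =>
    simp only [absorbG]
    split
    · obtain ⟨e, he⟩ := ih (g.1 ++ [pyLast x], pyLast x)
      exact ⟨pyLast x :: e, by simp [he]⟩
    · exact ih g

theorem absorbG_rest_eq_filter (g : List Int × Int) (t : List (List Int)) (hnd : t.Nodup) :
    (absorbG g t).2.2 = t.filter (fun x => x ∉ (absorbG g t).2.1) := by
  induction t generalizing g with
  | nil => simp [absorbG]
  | cons x xs ih =>
    have hx : x ∉ xs := (List.nodup_cons.mp hnd).1
    have hnd' : xs.Nodup := (List.nodup_cons.mp hnd).2
    simp only [absorbG]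
    split
    · rw [List.filter_cons, if_neg (by simp)]
      rw [ih _ hnd']
      apply List.filter_congr
      intro b hb
      have hbx : b ≠ x := fun h => hx (h ▸ hb)
      simp [hbx]
    · have hxa : x ∉ (absorbG g xs).2.1 := fun h => hx ((absorbG_abs_sublist g xs).subset h)
      rw [List.filter_cons, if_pos (by simpa using hxa)]
      rw [ih _ hnd']

-- reference pass-structured semantics
def passAll (l : List (List Int)) : List (List Int) :=
  match l with
  | [] => []
  | h :: t =>
    (absorbG (h, pyLast h) t).1.1 :: passAll (absorbG (h, pyLast h) t).2.2
termination_by l.length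
decreasing_by
  exact Nat.lt_succ_of_le (absorbG_rest_len _ _)

-- scan-structured single pass (port B without the dict index)
def place (gs : List (List Int × Int)) (x : List Int) : List (List Int × Int) :=
  match gs with
  | [] => [(x, pyLast x)]
  | g :: rest =>
    if pyFirst x = pyFirst g.1 ∧ pyLast x ≠ g.2 then (g.1 ++ [pyLast x], pyLast x) :: rest
    else g :: place rest x

def singleAux (gs : List (List Int × Int)) (xs : List (List Int)) : List (List Int × Int) :=
  xs.foldl place gs

theorem singleAux_cons_group (g : List Int × Int) (gs : List (List Int × Int))
    (xs : List (List Int)) :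
    singleAux (g :: gs) xs = (absorbG g xs).1 :: singleAux gs (absorbG g xs).2.2 := by
  induction xs generalizing g gs with
  | nil => simp [singleAux, absorbG]
  | cons x xs ih =>
    simp only [singleAux, List.foldl_cons] at ih ⊢
    by_cases hC : pyFirst x = pyFirst g.1 ∧ pyLast x ≠ g.2
    · rw [show place (g :: gs) x = (g.1 ++ [pyLast x], pyLast x) :: gs from by
        simp only [place]; rw [if_pos hC]]
      rw [ih]
      simp only [absorbG]
      rw [if_pos hC]
    · rw [show place (g :: gs) x = g :: place gs x from by
        simp only [place]; rw [if_neg hC]]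
      rw [ih]
      simp only [absorbG]
      rw [if_neg hC]
      rfl

theorem singleAux_nil_aux : ∀ (n : Nat) (xs : List (List Int)), xs.length ≤ n →
    (singleAux [] xs).map Prod.fst = passAll xs := by
  intro n
  induction n with
  | zero =>
    intro xs h
    have hnil : xs = [] := List.length_eq_zero_iff.mp (Nat.le_zero.mp h)
    subst hnil
    simp [singleAux, passAll]
  | succ n ih =>
    intro xs h
    cases xs with
    | nil => simp [singleAux, passAll]
    | cons x t =>
      have h1 : singleAux [] (x :: t) = singleAux [(x, pyLast x)] t := by
        simp [singleAux, List.foldl_cons, place]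
      rw [h1, singleAux_cons_group]
      have hlen : (absorbG (x, pyLast x) t).2.2.length ≤ n := by
        have h2 := absorbG_rest_len (x, pyLast x) t
        simp only [List.length_cons] at h
        omega
      simp only [List.map_cons]
      rw [ih _ hlen]
      conv_rhs => rw [passAll]

theorem singleAux_eq_passAll (xs : List (List Int)) :
    (singleAux [] xs).map Prod.fst = passAll xs :=
  singleAux_nil_aux xs.length xs le_rfl

-- ---- port B computes the scan-structured single pass ----

def idxList (groups : List (List Int × Int)) (k : Int) : List Nat :=
  (List.range groups.length).filter (fun i => pyFirst (groups.getD i ([], 0)).1 = k)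

def InvD (groups : List (List Int × Int)) (d : PySem.Dict Int (List Nat)) : Prop :=
  (∀ g ∈ groups, g.1 ≠ []) ∧ ∀ k : Int, d.getD k [] = idxList groups k

theorem bPlace_map_shift (ids : List Nat) (g : List Int × Int)
    (gs : List (List Int × Int)) (last : Int) :
    bPlace (ids.map (· + 1)) (g :: gs) last = (bPlace ids gs last).map (g :: ·) := by
  induction ids with
  | nil => simp [bPlace]
  | cons gi rest ih =>
    simp only [List.map_cons, bPlace, List.getD_cons_succ]
    by_cases hc : (gs.getD gi ([], 0)).2 ≠ last
    · rw [if_pos hc, if_pos hc]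
      rfl
    · rw [if_neg hc, if_neg hc, ih]

theorem idxList_nil (k : Int) : idxList [] k = [] := by simp [idxList]

theorem idxList_cons (g : List Int × Int) (gs : List (List Int × Int)) (k : Int) :
    idxList (g :: gs) k =
      (if pyFirst g.1 = k then [0] else []) ++ (idxList gs k).map (· + 1) := by
  simp only [idxList, List.length_cons, List.range_succ_eq_map, List.filter_cons]
  have hshift : (List.filter (fun i => decide (pyFirst ((g :: gs).getD i ([], 0)).1 = k))
      ((List.range gs.length).map Nat.succ)) =
      ((List.range gs.length).filter (fun i => decide (pyFirst (gs.getD i ([], 0)).1 = k))).map Nat.succ := by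
    rw [List.filter_map]
    have hco : (fun i => decide (pyFirst ((g :: gs).getD i ([], 0)).1 = k)) ∘ Nat.succ
        = fun i => decide (pyFirst (gs.getD i ([], 0)).1 = k) := by
      funext i
      simp [Function.comp]
    rw [hco]
  rw [hshift]
  have hmap : ∀ l : List Nat, l.map Nat.succ = l.map (· + 1) := by
    intro l; simp
  rw [hmap]
  simp only [List.getD_cons_zero]
  by_cases hk : pyFirst g.1 = k <;> simp [hk]

theorem place_eq_bPlace (x : List Int) (groups : List (List Int × Int)) :
    place groups x =
      (bPlace (idxList groups (pyFirst x)) groups (pyLast x)).getD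
        (groups ++ [(x, pyLast x)]) := by
  induction groups with
  | nil => simp [place, idxList_nil, bPlace]
  | cons g gs ih =>
    rw [idxList_cons]
    by_cases hk : pyFirst g.1 = pyFirst x
    · rw [if_pos hk]
      simp only [List.cons_append, List.nil_append]
      by_cases hl : g.2 ≠ pyLast x
      · rw [show place (g :: gs) x = (g.1 ++ [pyLast x], pyLast x) :: gs from by
          simp only [place]; rw [if_pos ⟨hk.symm, fun h => hl h.symm⟩]]
        simp only [bPlace, List.getD_cons_zero]
        rw [if_pos hl]
        rfl
      · have hl2 : g.2 = pyLast x := not_not.mp hl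
        rw [show place (g :: gs) x = g :: place gs x from by
          simp only [place]; rw [if_neg (by simp [hl2])]]
        simp only [bPlace, List.getD_cons_zero]
        rw [if_neg (by simp [hl2])]
        rw [bPlace_map_shift, ih]
        cases hb : bPlace (idxList gs (pyFirst x)) gs (pyLast x) <;> simp
    · rw [if_neg hk]
      simp only [List.nil_append]
      rw [show place (g :: gs) x = g :: place gs x from by
        simp only [place]; rw [if_neg (fun hc => hk hc.1.symm)]]
      rw [bPlace_map_shift, ih]
      cases hb : bPlace (idxList gs (pyFirst x)) gs (pyLast x) <;> simp

theorem bPlace_some : ∀ (ids : List Nat) (groups : List (List Int × Int)) (last : Int)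
    (gs' : List (List Int × Int)), bPlace ids groups last = some gs' →
    ∃ gi ∈ ids, gs' = groups.set gi ((groups.getD gi ([], 0)).1 ++ [last], last) := by
  intro ids
  induction ids with
  | nil => intro _ _ _ h; simp [bPlace] at h
  | cons gi rest ih =>
    intro groups last gs' h
    simp only [bPlace] at h
    by_cases hc : (groups.getD gi ([], 0)).2 ≠ last
    · rw [if_pos hc] at h
      exact ⟨gi, by simp, (Option.some.injEq _ _).mp h |>.symm⟩
    · rw [if_neg hc] at h
      obtain ⟨gj, hj, he⟩ := ih groups last gs' h
      exact ⟨gj, by simp [hj], he⟩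

theorem getD_append_lt {α : Type} (A B : List α) (j : Nat) (d : α) (h : j < A.length) :
    (A ++ B).getD j d = A.getD j d := by
  rw [List.getD_eq_getElem?_getD, List.getD_eq_getElem?_getD, List.getElem?_append_left h]

theorem getD_append_ge {α : Type} (A B : List α) (j : Nat) (d : α) (h : A.length ≤ j) :
    (A ++ B).getD j d = B.getD (j - A.length) d := by
  rw [List.getD_eq_getElem?_getD, List.getD_eq_getElem?_getD, List.getElem?_append_right h]

theorem idxList_append_singleton (groups : List (List Int × Int)) (p : List Int × Int) (k : Int) :
    idxList (groups ++ [p]) k =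
      idxList groups k ++ (if pyFirst p.1 = k then [groups.length] else []) := by
  simp only [idxList, List.length_append, List.length_cons, List.length_nil]
  rw [show groups.length + (0 + 1) = groups.length + 1 from by omega]
  rw [List.range_succ, List.filter_append]
  congr 1
  · apply List.filter_congr
    intro i hi
    simp only [List.mem_range] at hi
    rw [getD_append_lt _ _ _ _ hi]
  · have hp : (groups ++ [p]).getD groups.length ([], 0) = p := by
      rw [getD_append_ge _ _ _ _ le_rfl]
      simp
    by_cases hk : pyFirst p.1 = k <;> simp [hk]

theorem idxList_lt_length (groups : List (List Int × Int)) (k : Int) (gi : Nat)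
    (h : gi ∈ idxList groups k) : gi < groups.length := by
  simp only [idxList, List.mem_filter, List.mem_range] at h
  exact h.1

theorem bStep_eq_place (groups : List (List Int × Int)) (d : PySem.Dict Int (List Nat))
    (item : List Int) (hInv : InvD groups d) (hne : item ≠ []) :
    (bStep (groups, d) item).1 = place groups item ∧
    InvD (bStep (groups, d) item).1 (bStep (groups, d) item).2 := by
  obtain ⟨hg, hd⟩ := hInv
  have hids : d.getD (pyFirst item) [] = idxList groups (pyFirst item) := hd _
  simp only [bStep]
  cases hb : bPlace (d.getD (pyFirst item) []) groups (pyLast item) with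
  | some gs' =>
    rw [hids] at hb
    obtain ⟨gi, hgi, he⟩ := bPlace_some _ _ _ _ hb
    have hgilt : gi < groups.length := idxList_lt_length _ _ _ hgi
    have hcne : (groups.getD gi ([], 0)).1 ≠ [] := by
      apply hg
      rw [List.getD_eq_getElem _ _ hgilt]
      exact List.getElem_mem _
    constructor
    · show gs' = place groups item
      rw [place_eq_bPlace, hb]
      rfl
    · subst he
      constructor
      · intro g hgm
        rcases List.mem_or_eq_of_mem_set hgm with h | h
        · exact hg _ h
        · subst h; simp
      · intro k
        rw [hd k]
        simp only [idxList, List.length_set]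
        apply List.filter_congr
        intro i hi
        simp only [List.mem_range] at hi
        by_cases higi : i = gi
        · subst higi
          have h1 : (groups.set i ((groups.getD i ([], 0)).1 ++ [pyLast item], pyLast item)).getD i ([], 0)
              = ((groups.getD i ([], 0)).1 ++ [pyLast item], pyLast item) := by
            rw [List.getD_eq_getElem _ _ (by simpa using hi)]
            simp [List.getElem_set_self]
          rw [h1]
          rw [pyFirst_append _ _ hcne]
        · have h1 : (groups.set gi ((groups.getD gi ([], 0)).1 ++ [pyLast item], pyLast item)).getD i ([], 0)
              = groups.getD i ([], 0) := by
            rw [List.getD_eq_getElem _ _ (by simpa using hi),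
                List.getD_eq_getElem _ _ hi]
            rw [List.getElem_set_ne (by omega)]
          rw [h1]
  | none =>
    constructor
    · show groups ++ [(item, pyLast item)] = place groups item
      rw [place_eq_bPlace, ← hids, hb]
      rfl
    · constructor
      · intro g hgm
        rcases List.mem_append.mp hgm with h | h
        · exact hg _ h
        · simp only [List.mem_singleton] at h
          subst h
          simpa using hne
      · intro k
        rw [PySem.Dict.getD_insert]
        rw [idxList_append_singleton]
        by_cases hkk : k = pyFirst item
        · subst hkk
          rw [if_pos rfl, hd, if_pos rfl]
        · rw [if_neg hkk, hd, if_neg (fun h => hkk h.symm)]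
          simp

theorem foldl_bStep : ∀ (xs : List (List Int)) (groups : List (List Int × Int))
    (d : PySem.Dict Int (List Nat)), InvD groups d → (∀ l ∈ xs, l ≠ []) →
    (xs.foldl bStep (groups, d)).1 = singleAux groups xs := by
  intro xs
  induction xs with
  | nil => intro groups d _ _; simp [singleAux]
  | cons x t ih =>
    intro groups d hInv hne
    obtain ⟨h1, h2⟩ := bStep_eq_place groups d x hInv (hne x (by simp))
    have h3 := ih (bStep (groups, d) x).1 (bStep (groups, d) x).2 h2
      (fun l hl => hne l (List.mem_cons_of_mem _ hl))
    simp only [List.foldl_cons, singleAux] at h3 ⊢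
    rw [← h1]
    rw [Prod.mk.eta] at h3
    exact h3

theorem empty_invD : InvD [] (PySem.Dict.empty : PySem.Dict Int (List Nat)) := by
  constructor
  · intro g hg; simp at hg
  · intro k
    simp [idxList_nil, PySem.Dict.getD, PySem.Dict.get?, PySem.Dict.empty]

theorem alt_eq_singleAux (big_list : List (List Int)) (h : ∀ l ∈ big_list, l ≠ []) :
    searchBS_alt big_list = (singleAux [] big_list).map Prod.fst := by
  unfold searchBS_alt
  rw [foldl_bStep big_list [] PySem.Dict.empty empty_invD h]

-- ---- port A computes the pass-structured semantics ----

theorem getD_set_self (L : List (List Int)) (s : Nat) (v : List Int) (h : s < L.length) :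
    (L.set s v).getD s [] = v := by
  rw [List.getD_eq_getElem _ _ (by simpa using h)]
  simp [List.getElem_set_self]

theorem set_getD_self (L : List (List Int)) (s : Nat) (h : s < L.length) :
    L.set s (L.getD s []) = L := by
  apply List.ext_getElem (by simp)
  intro n h1 h2
  rw [List.getElem_set]
  split
  · rename_i heq
    subst heq
    rw [List.getD_eq_getElem _ _ h]
  · rfl

theorem drop_set_of_lt (L : List (List Int)) (s i : Nat) (v : List Int) (h : s < i) :
    (L.set s v).drop i = L.drop i := by
  apply List.ext_getElem?
  intro n
  rw [List.getElem?_drop, List.getElem?_drop]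
  rw [List.getElem?_set_ne (by omega)]

theorem aInner_spec (t : List (List Int)) :
    ∀ (L : List (List Int)) (i : Nat) (s : Nat) (dup : List (List Int)) (g : List Int × Int),
    s < i → s < L.length → L.drop i = t → L.getD s [] = g.1 → g.2 = pyLast g.1 →
    aInner s i L.length L dup = (L.set s (absorbG g t).1.1, dup ++ (absorbG g t).2.1) := by
  induction t with
  | nil =>
    intro L i s dup g hsi hsL hdrop hg1 hg2
    have hiL : L.length ≤ i := List.drop_eq_nil_iff.mp hdrop
    rw [aInner, dif_neg (by omega)]
    simp only [absorbG, List.append_nil]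
    rw [← hg1, set_getD_self L s hsL]
  | cons x t' ih =>
    intro L i s dup g hsi hsL hdrop hg1 hg2
    have hiL : i < L.length := by
      by_contra hcon
      rw [List.drop_eq_nil_of_le (by omega)] at hdrop
      exact (List.cons_ne_nil _ _) hdrop.symm
    have hxt : L.drop i = L[i] :: L.drop (i+1) := List.drop_eq_getElem_cons hiL
    have hx : L.getD i [] = x := by
      rw [List.getD_eq_getElem _ _ hiL]
      rw [hxt] at hdrop
      exact (List.cons.injEq _ _ _ _).mp hdrop |>.1
    have ht' : L.drop (i+1) = t' := by
      rw [hxt] at hdrop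
      exact ((List.cons.injEq _ _ _ _).mp hdrop).2
    rw [aInner, dif_pos hiL]
    simp only [hx, hg1]
    by_cases hc : pyFirst x = pyFirst g.1 ∧ pyLast x ≠ g.2
    · rw [if_pos ⟨hc.1, by rw [← hg2]; exact hc.2, by omega⟩]
      have hlen : (L.set s (g.1 ++ [pyLast x])).length = L.length := by simp
      have := ih (L.set s (g.1 ++ [pyLast x])) (i+1) s (dup ++ [x])
        (g.1 ++ [pyLast x], pyLast x) (by omega) (by simpa using hsL)
        (by rw [drop_set_of_lt _ _ _ _ (by omega)]; exact ht')
        (getD_set_self _ _ _ hsL)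
        (by simp [pyLast_append])
      rw [hlen] at this
      rw [this]
      simp only [absorbG]
      rw [if_pos hc]
      rw [List.set_set]
      simp
    · rw [if_neg (by
        intro hcon
        exact hc ⟨hcon.1, by rw [hg2]; exact hcon.2.1⟩)]
      have := ih L (i+1) s dup g (by omega) hsL ht' hg1 hg2
      rw [this]
      simp only [absorbG]
      rw [if_neg hc]

theorem delete_step (acc : List (List Int)) (d : List Int) :
    (match PySem.List.index? acc d with
     | some i => acc.eraseIdx i
     | none => acc) = acc.erase d := by
  induction acc with
  | nil => simp [PySem.List.index?_eq_idxOf?, List.erase]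
  | cons a tl ih =>
    by_cases h : a = d
    · subst h
      rw [PySem.List.index?_cons_self]
      simp [List.erase_cons_head]
    · rw [PySem.List.index?_cons_of_ne tl h]
      rw [List.erase_cons_tail (by simp [h])]
      cases hi : PySem.List.index? tl d with
      | none =>
        rw [hi] at ih
        simpa using ih
      | some i =>
        rw [hi] at ih
        simpa [List.eraseIdx_cons_succ] using ih

theorem aDelete_eq_foldl_erase (dup : List (List Int)) :
    ∀ L : List (List Int), aDelete L dup = dup.foldl List.erase L := by
  induction dup with
  | nil => intro L; simp [aDelete]
  | cons a tl ih =>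
    intro L
    unfold aDelete
    rw [List.foldl_cons, List.foldl_cons, delete_step]
    exact ih (L.erase a)

theorem aDelete_spec : ∀ (abs t P : List (List Int)) (H : List Int),
    t.Nodup → abs.Sublist t → (∀ a ∈ abs, a ∉ P ∧ a ≠ H) →
    aDelete (P ++ H :: t) abs = P ++ H :: t.filter (fun x => x ∉ abs) := by
  intro abs
  induction abs with
  | nil =>
    intro t P H _ _ _
    simp [aDelete]
  | cons a abs' ih =>
    intro t P H hnd hsub hdisj
    have ha := hdisj a (by simp)
    rw [aDelete_eq_foldl_erase, List.foldl_cons]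
    rw [List.erase_append_right _ ha.1]
    rw [List.erase_cons_tail (by simp only [beq_iff_eq]; exact fun h => ha.2 h.symm)]
    rw [← aDelete_eq_foldl_erase]
    have hsub' : abs'.Sublist (t.erase a) := by
      have h1 := hsub.erase a
      rwa [List.erase_cons_head] at h1
    rw [ih (t.erase a) P H (hnd.erase a) hsub'
      (fun b hb => hdisj b (List.mem_cons_of_mem _ hb))]
    congr 2
    rw [hnd.erase_eq_filter a, List.filter_filter]
    apply List.filter_congr
    intro b _
    by_cases h1 : b = a <;> by_cases h2 : b ∈ abs' <;> simp [h1, h2]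

-- the zipWith (· ++ ·) representation invariant relating the evolving list to the input
def InvA (U : List (List Int)) (L : List (List Int)) (s : Nat) : Prop :=
  ∃ us exts : List (List Int),
    us.length = exts.length ∧
    L = List.zipWith (· ++ ·) us exts ∧
    us.Sublist U ∧
    ∀ j, s ≤ j → exts.getD j [] = []

def PF (a b : List Int) : Prop := ¬ a <+: b ∧ ¬ b <+: a

theorem zipWith_append_nil : ∀ (a b : List (List Int)), a.length ≤ b.length →
    (∀ j, b.getD j [] = []) → List.zipWith (· ++ ·) a b = a := by
  intro a
  induction a with
  | nil => intro b _ _; simp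
  | cons x a' ih =>
    intro b hl hb
    cases b with
    | nil => simp at hl
    | cons y b' =>
      have hy : y = [] := hb 0
      simp only [List.zipWith_cons_cons]
      rw [ih b' (by simpa using hl) (fun j => by
        have := hb (j+1)
        rwa [List.getD_cons_succ] at this)]
      simp [hy]

theorem mem_zipWith_append : ∀ (A B : List (List Int)) (x : List Int),
    x ∈ List.zipWith (· ++ ·) A B → ∃ u ∈ A, ∃ e, x = u ++ e := by
  intro A
  induction A with
  | nil => intro B x hx; simp at hx
  | cons a A' ih =>
    intro B x hx
    cases B with
    | nil => simp at hx
    | cons b B' =>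
      simp only [List.zipWith_cons_cons, List.mem_cons] at hx
      rcases hx with h | h
      · exact ⟨a, by simp, b, h⟩
      · obtain ⟨u, hu, e, he⟩ := ih B' x h
        exact ⟨u, by simp [hu], e, he⟩

theorem getD_map_const_nil : ∀ (l : List (List Int)) (j : Nat),
    (l.map (fun _ => ([] : List Int))).getD j [] = [] := by
  intro l
  induction l with
  | nil => intro j; simp
  | cons x tl ih =>
    intro j
    cases j with
    | zero => simp
    | succ j => simpa [List.getD_cons_succ] using ih j

theorem PF_ne (a b : List Int) (h : PF a b) : a ≠ b := by
  intro heq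
  exact h.1 (heq ▸ List.prefix_refl a)

theorem aLoop_spec : ∀ (fuel : Nat) (U L : List (List Int)) (s ne : Nat),
    List.Pairwise PF U → InvA U L s →
    (L.length ≤ ne ∨ (s = 0 ∧ ne = 1)) → L.length - s + 2 ≤ fuel →
    aLoop fuel L s ne = L.take s ++ passAll (L.drop s) := by
  intro fuel
  induction fuel with
  | zero => intro U L s ne _ _ _ hfuel; omega
  | succ fuel ih =>
    intro U L s ne hU hInv hne hfuel
    obtain ⟨us, exts, hlen, hL, hsubU, hext⟩ := hInv
    have hLlen : L.length = us.length := by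
      rw [hL]; simp [List.length_zipWith, hlen]
    by_cases hs : s < L.length
    · -- a genuine iteration
      have hsus : s < us.length := by omega
      have hsn : s < ne := by rcases hne with h | ⟨h1, h2⟩ <;> omega
      have hdropLU : ∀ m, s ≤ m → L.drop m = us.drop m := by
        intro m hm
        rw [hL, List.drop_zipWith]
        apply zipWith_append_nil
        · simp [hlen]
        · intro j
          have h1 : (exts.drop m).getD j [] = exts.getD (m + j) [] := by
            simp [List.getD_eq_getElem?_getD, List.getElem?_drop]
          rw [h1]
          exact hext (m + j) (by omega)
      have hdropS := hdropLU s le_rfl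
      have hdropS1 := hdropLU (s+1) (by omega)
      set hd := us[s] with hhd
      set t := us.drop (s+1) with hht
      have husplit : us.drop s = hd :: t := List.drop_eq_getElem_cons hsus
      have hLs : L.getD s [] = hd := by
        rw [List.getD_eq_getElem _ _ hs]
        have h1 : L.drop s = hd :: t := by rw [hdropS, husplit]
        have h2 : L.drop s = L[s] :: L.drop (s+1) := List.drop_eq_getElem_cons hs
        rw [h2] at h1
        exact ((List.cons.injEq _ _ _ _).mp h1).1
      set g : List Int × Int := (L.getD s [], pyLast (L.getD s [])) with hg
      have hPus : us.Pairwise PF := hU.sublist hsubU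
      -- pairwise facts across the split at s
      have husTD : us = us.take s ++ us.drop s := (List.take_append_drop s us).symm
      have hcross : ∀ u ∈ us.take s, ∀ b ∈ us.drop s, PF u b := by
        have h1 : (us.take s ++ us.drop s).Pairwise PF := by rw [← husTD]; exact hPus
        have h2 := (List.pairwise_append.mp h1).2.2
        exact h2
      have hdropPW : (us.drop s).Pairwise PF := hPus.sublist (List.drop_sublist s us)
      have hheadt : ∀ a ∈ t, PF hd a := by
        have h1 : (hd :: t).Pairwise PF := husplit ▸ hdropPW
        exact (List.pairwise_cons.mp h1).1
      have htPW : t.Pairwise PF := by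
        have h1 : (hd :: t).Pairwise PF := husplit ▸ hdropPW
        exact (List.pairwise_cons.mp h1).2
      have htND : t.Nodup := htPW.imp (fun h => PF_ne _ _ h)
      -- the inner loop
      have hinner : aInner s s L.length L [] =
          (L.set s (absorbG g t).1.1, [] ++ (absorbG g t).2.1) := by
        rw [aInner, dif_pos hs]
        rw [if_neg (by intro h; exact h.2.2 rfl)]
        exact aInner_spec t L (s+1) s [] g (by omega) hs hdropS1 rfl rfl
      set Habs := (absorbG g t).1.1 with hHabs
      set abs := (absorbG g t).2.1 with habs
      set rest := t.filter (fun x => x ∉ abs) with hrest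
      -- absorbed items are distinct later elements
      have habs_sub : abs.Sublist t := absorbG_abs_sublist g t
      have habs_memt : ∀ a ∈ abs, a ∈ t := fun a ha => habs_sub.subset ha
      have htake_mem : ∀ x ∈ L.take s, ∃ u ∈ us.take s, ∃ e, x = u ++ e := by
        intro x hx
        rw [hL, List.take_zipWith] at hx
        exact mem_zipWith_append _ _ _ hx
      have hdisj : ∀ a ∈ abs, a ∉ L.take s ∧ a ≠ Habs := by
        intro a ha
        have hat : a ∈ t := habs_memt a ha
        have hads : a ∈ us.drop s := by rw [husplit]; exact List.mem_cons_of_mem _ hat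
        constructor
        · intro hmem
          obtain ⟨u, hu, e, he⟩ := htake_mem a hmem
          exact (hcross u hu a hads).1 (he ▸ List.prefix_append u e)
        · intro heq
          obtain ⟨e, hee⟩ := absorbG_head_extend g t
          have hge : g.1 = hd := hLs
          have h1 : Habs = hd ++ e := by rw [hHabs, hee, hge]
          exact (hheadt a hat).1 (by rw [heq, h1]; exact List.prefix_append hd e)
      -- the deletion pass
      have hset : L.set s Habs = L.take s ++ Habs :: L.drop (s+1) := by
        rw [List.set_eq_take_append_cons_drop, if_pos hs]
      have hdel : aDelete (L.set s Habs) abs = L.take s ++ Habs :: rest := by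
        rw [hset, hdropS1]
        exact aDelete_spec abs t (L.take s) Habs htND habs_sub hdisj
      -- the new state satisfies the invariant
      obtain ⟨eH, heH⟩ := absorbG_head_extend g t
      have hgHd : g.1 = hd := hLs
      set L' := L.take s ++ Habs :: rest with hL'
      have htakeL : (L.take s).length = s := by simp; omega
      have htakeUS : (us.take s).length = s := by simp; omega
      have htakeES : (exts.take s).length = s := by simp; omega
      have hInv' : InvA U L' (s+1) := by
        refine ⟨us.take s ++ hd :: rest,
                exts.take s ++ eH :: rest.map (fun _ => []), ?_, ?_, ?_, ?_⟩
        · simp [htakeUS, htakeES]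
        · rw [hL', List.zipWith_append (show (us.take s).length = (exts.take s).length by rw [htakeUS, htakeES])]
          simp only [List.zipWith_cons_cons]
          congr 1
          · rw [← List.take_zipWith, ← hL]
          · congr 1
            · show Habs = us[s] ++ eH
              rw [hHabs, heH, hgHd]
            · exact (zipWith_append_nil rest _ (by simp) (fun j => getD_map_const_nil _ _)).symm
        · have h1 : (us.take s ++ hd :: rest).Sublist (us.take s ++ hd :: t) := by
            apply List.Sublist.append_left
            exact List.Sublist.cons₂ hd (by rw [hrest]; exact List.filter_sublist)
          have h2 : us.take s ++ hd :: t = us := by rw [← husplit, List.take_append_drop]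
          exact (h2 ▸ h1).trans hsubU
        · intro j hj
          rw [getD_append_ge _ _ _ _ (by rw [htakeES]; omega), htakeES]
          obtain ⟨m, hm⟩ : ∃ m, j - s = m + 1 := ⟨j - s - 1, by omega⟩
          rw [hm, List.getD_cons_succ]
          exact getD_map_const_nil _ _
      have hrest_eq : (absorbG g t).2.2 = rest := absorbG_rest_eq_filter g t htND
      have hL'len : L'.length ≤ L.length := by
        have h1 : rest.length ≤ t.length := by
          rw [hrest]; exact List.length_filter_le _ _
        have h2 : us.length = s + 1 + t.length := by
          rw [hht]; simp; omega
        simp only [hL', List.length_append, List.length_cons, htakeL]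
        omega
      have hstep := ih U L' (s+1) L.length hU hInv' (Or.inl hL'len) (by omega)
      have htakeL' : L'.take (s+1) = L.take s ++ [Habs] := by
        rw [hL', List.take_append, List.take_of_length_le (by rw [htakeL]; omega), htakeL,
            show s + 1 - s = 1 from by omega]
        rfl
      have hdropL' : L'.drop (s+1) = rest := by
        rw [hL', List.drop_append, List.drop_eq_nil_of_le (by rw [htakeL]; omega), htakeL,
            show s + 1 - s = 1 from by omega]
        rfl
      rw [aLoop, if_pos hsn, hinner]
      simp only [List.nil_append]
      rw [hdel, hstep, htakeL', hdropL']
      have hpass : passAll (L.drop s) = Habs :: passAll rest := by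
        have h1 : L.drop s = L.getD s [] :: t := by
          rw [hdropS, husplit, hLs]
        rw [h1]
        conv_lhs => rw [passAll]
        rw [← hg, ← hHabs, hrest_eq]
      rw [hpass]
      simp
    · -- trailing no-op iterations
      have hs2 : L.length ≤ s := Nat.le_of_not_lt hs
      have hds : L.drop s = [] := List.drop_eq_nil_of_le hs2
      have htk : L.take s = L := List.take_of_length_le hs2
      rw [hds, htk]
      have hpassnil : passAll [] = [] := by rw [passAll]
      rw [hpassnil, List.append_nil]
      by_cases hsn : s < ne
      · rw [aLoop, if_pos hsn]
        have hinner : aInner s s L.length L [] = (L, []) := by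
          rw [aInner, dif_neg (by omega)]
        rw [hinner]
        have hdel : aDelete L [] = L := by simp [aDelete]
        rw [hdel]
        cases fuel with
        | zero => omega
        | succ f =>
          rw [aLoop, if_neg (by omega)]
      · rw [aLoop, if_neg hsn]

-- ===== VERDICT (by name: the statement is the Claim_ definition above) =====
theorem searchBS_spec : Claim_equal_searchBS := by
  intro big_list _ hPre
  obtain ⟨hne, hpw⟩ := hPre
  unfold Spec_searchBS
  have hA : searchBS big_list = passAll big_list := by
    unfold searchBS
    rw [show big_list.map (fun i => i) = big_list from List.map_id' big_list]
    have hInv0 : InvA big_list big_list 0 := by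
      refine ⟨big_list, big_list.map (fun _ => []), by simp, ?_, List.Sublist.refl _, ?_⟩
      · exact (zipWith_append_nil big_list _ (by simp) (fun j => getD_map_const_nil _ _)).symm
      · intro j _; exact getD_map_const_nil _ _
    have h1 := aLoop_spec (big_list.length + 2) big_list big_list 0 1
      (hpw.imp (fun h => h)) hInv0 (Or.inr ⟨rfl, rfl⟩) (by omega)
    simpa using h1
  have hB : searchBS_alt big_list = passAll big_list := by
    rw [alt_eq_singleAux big_list hne, singleAux_eq_passAll]
  rw [hA, hB]
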